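-- pv_equiv track=rewrite | github.com/StephaneWamba/finlens | backend/core/ai/agent/agent3_generation/nodes.py | _remove_sources_from_text
-- ===== SOURCE A (Python) =====
-- def _remove_sources_from_text(text: str) -> str:
--     """Remove sources section from text if LLM included it."""
--     if "## Sources" not in text and "### Sources" not in text:
--         return text
--
--     lines = text.split('\n')
--     cleaned_lines = []
--     skip = False
--
--     for line in lines:
--         if line.strip().startswith('## Sources') or line.strip().startswith('### Sources'):
--             skip = True
--             continue
--         if skip and line.strip().startswith('#'):
--             skip = False
--             cleaned_lines.append(line)
--             continue
--         if skip:
--             continue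
--         cleaned_lines.append(line)
--
--     return '\n'.join(cleaned_lines).strip()
-- ===== SOURCE B (Python) =====
-- def _remove_sources_from_text(text: str) -> str:
--     """Remove sources section from text if LLM included it."""
--     if "## Sources" not in text and "### Sources" not in text:
--         return text
--
--     # Group the lines into sections back-to-front: a new section starts at every
--     # heading line; whatever precedes the first heading is a headerless preamble.
--     sections = []   # sections, collected in reverse order
--     cur = []        # lines of the current chunk, in reverse order
--     for line in reversed(text.split('\n')):
--         cur.append(line)
--         if line.strip().startswith('#'):
--             sections.append(cur[::-1])
--             cur = []
--     sections.reverse()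
--     preamble = cur[::-1]
--
--     kept = preamble + [l for sec in sections
--                        if not (sec[0].strip().startswith('## Sources')
--                                or sec[0].strip().startswith('### Sources'))
--                        for l in sec]
--     return '\n'.join(kept).strip()
-- ===== Notes on version B (the rewrite author's own statement) =====
-- stated objective: alternative
-- what changed: Replaces A's forward scan with a skip-flag state machine by grouping lines into heading-delimited sections built back-to-front, dropping whole Sources sections, and flattening the kept sections.
import Mathlib
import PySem

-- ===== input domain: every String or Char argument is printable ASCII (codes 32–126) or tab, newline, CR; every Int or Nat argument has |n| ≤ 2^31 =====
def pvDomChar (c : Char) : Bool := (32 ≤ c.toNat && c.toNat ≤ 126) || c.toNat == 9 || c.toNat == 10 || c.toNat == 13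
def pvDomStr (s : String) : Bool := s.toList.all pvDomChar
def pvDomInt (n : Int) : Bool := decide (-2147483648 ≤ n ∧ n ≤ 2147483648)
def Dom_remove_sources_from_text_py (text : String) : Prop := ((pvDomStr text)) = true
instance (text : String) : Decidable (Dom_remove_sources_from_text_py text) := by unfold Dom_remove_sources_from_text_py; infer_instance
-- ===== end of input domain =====

-- B groups lines into heading-delimited sections (built back-to-front) and drops whole
-- Sources sections, instead of A's forward scan with a skip flag. Same return value.

-- ===== PORT A =====
-- A's loop body: state (skip, cleaned_lines), branches in A's order
def pvStepA (st : Bool × List String) (line : String) : Bool × List String :=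
  if PySem.Str.startswith (PySem.Str.strip line) "## Sources"
      || PySem.Str.startswith (PySem.Str.strip line) "### Sources" then
    (true, st.2)
  else if st.1 && PySem.Str.startswith (PySem.Str.strip line) "#" then
    (false, st.2 ++ [line])
  else if st.1 then
    (true, st.2)
  else
    (st.1, st.2 ++ [line])

def remove_sources_from_text_py (text : String) : String :=
  if !PySem.Str.isIn "## Sources" text && !PySem.Str.isIn "### Sources" text then
    text
  else
    let lines := (PySem.Str.split? text "\n").getD []
    let res := lines.foldl pvStepA (false, [])
    PySem.Str.strip (PySem.Str.join "\n" res.2)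

-- ===== PORT B =====
def pvIsHead (l : String) : Bool := PySem.Str.startswith (PySem.Str.strip l) "#"
def pvIsSrc (l : String) : Bool :=
  PySem.Str.startswith (PySem.Str.strip l) "## Sources"
    || PySem.Str.startswith (PySem.Str.strip l) "### Sources"

-- B's reversed loop: state (sections, current chunk); a heading closes the current chunk
def pvStepB (line : String) (st : List (List String) × List String) :
    List (List String) × List String :=
  let cur := line :: st.2
  if pvIsHead line then (cur :: st.1, []) else (st.1, cur)

def remove_sources_from_text_py_alt (text : String) : String :=
  if !PySem.Str.isIn "## Sources" text && !PySem.Str.isIn "### Sources" text then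
    text
  else
    let lines := (PySem.Str.split? text "\n").getD []
    let sp := lines.foldr pvStepB ([], [])
    let kept := sp.2 ++ (sp.1.filter (fun sec => !pvIsSrc (sec.headD ""))).flatten
    PySem.Str.strip (PySem.Str.join "\n" kept)

-- ===== PRECONDITION & SPEC =====
def Spec_remove_sources_from_text_py (text : String) (out : String) : Prop := out = remove_sources_from_text_py_alt text
instance (text : String) (out : String) : Decidable (Spec_remove_sources_from_text_py text out) := by unfold Spec_remove_sources_from_text_py; infer_instance

-- ===== CLAIM (what is proved, stated in full; the proofs are below) =====
def Claim_equal_remove_sources_from_text_py : Prop := ∀ (text : String), Dom_remove_sources_from_text_py text → Spec_remove_sources_from_text_py text (remove_sources_from_text_py text)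

-- ===== LEMMAS AND PROOFS =====

-- the lines A keeps, as a front-to-back recursion parameterised by the skip flag
def pvSpec (skip : Bool) : List String → List String
  | [] => []
  | l :: ls =>
    if pvIsSrc l then pvSpec true ls
    else if pvIsHead l then l :: pvSpec false ls
    else if skip then pvSpec true ls
    else l :: pvSpec false ls

theorem pvStepA_eq (st : Bool × List String) (line : String) :
    pvStepA st line =
      if pvIsSrc line then (true, st.2)
      else if st.1 && pvIsHead line then (false, st.2 ++ [line])
      else if st.1 then (true, st.2)
      else (st.1, st.2 ++ [line]) := rfl

theorem pvSrc_head {l : String} (h : pvIsSrc l = true) : pvIsHead l = true := by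
  unfold pvIsSrc at h
  unfold pvIsHead
  rcases Bool.or_eq_true_iff.mp h with h' | h' <;>
  · simp only [PySem.Str.startswith] at h' ⊢
    rw [PySem.Chars.startswith_iff] at h' ⊢
    exact List.IsPrefix.trans (by decide) h'

theorem pvFoldA (ls : List String) : ∀ (skip : Bool) (acc : List String),
    (ls.foldl pvStepA (skip, acc)).2 = acc ++ pvSpec skip ls := by
  induction ls with
  | nil => intro skip acc; simp [pvSpec]
  | cons l ls ih =>
    intro skip acc
    simp only [List.foldl_cons, pvStepA_eq, pvSpec]
    by_cases hs : pvIsSrc l = true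
    · simp [hs, ih]
    · by_cases hh : pvIsHead l = true
      · cases skip <;> simp [hs, hh, ih]
      · cases skip <;> simp [hs, hh, ih]

theorem pvFoldB (ls : List String) :
    ((ls.foldr pvStepB ([], [])).2
        ++ ((ls.foldr pvStepB ([], [])).1.filter (fun sec => !pvIsSrc (sec.headD ""))).flatten
      = pvSpec false ls)
    ∧ (((ls.foldr pvStepB ([], [])).1.filter (fun sec => !pvIsSrc (sec.headD ""))).flatten
      = pvSpec true ls) := by
  induction ls with
  | nil => simp [pvSpec]
  | cons l ls ih =>
    obtain ⟨ih1, ih2⟩ := ih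
    simp only [List.foldr_cons, pvSpec]
    by_cases hh : pvIsHead l = true
    · by_cases hs : pvIsSrc l = true
      · constructor <;> · simp [pvStepB, hh, hs]; simpa using ih2
      · constructor <;> · simp [pvStepB, hh, hs]; rw [← ih1]; simp
    · have hs : pvIsSrc l = false := by
        cases h : pvIsSrc l
        · rfl
        · exact absurd (pvSrc_head h) (by simp [hh])
      constructor
      · simp [pvStepB, hh, hs]; rw [← ih1]; simp
      · simp [pvStepB, hh, hs]; simpa using ih2

-- ===== VERDICT (by name: the statement is the Claim_ definition above) =====
theorem remove_sources_from_text_py_spec : Claim_equal_remove_sources_from_text_py := by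
  intro text _
  unfold Spec_remove_sources_from_text_py remove_sources_from_text_py remove_sources_from_text_py_alt
  split
  · rfl
  · have hA := pvFoldA ((PySem.Str.split? text "\n").getD []) false []
    have hB := (pvFoldB ((PySem.Str.split? text "\n").getD [])).1
    simp only [List.nil_append] at hA
    simp only [hA, hB]
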